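-- pv_equiv track=rewrite | github.com/kubadguy/myviksitbharatproject | src/database/query_validator.py | _has_multiple_statements
-- ===== SOURCE A (Python) =====
-- def _has_multiple_statements(query: str) -> bool:
--     """Check if query contains multiple statements"""
--     # Simple check for semicolons (excluding those in strings)
--     in_string = False
--     string_char = None
--
--     for i, char in enumerate(query):
--         if char in ('"', "'") and (i == 0 or query[i-1] != '\\'):
--             if not in_string:
--                 in_string = True
--                 string_char = char
--             elif char == string_char:
--                 in_string = False
--         elif char == ';' and not in_string:
--             # Check if there's more content after the semicolon
--             remaining = query[i+1:].strip()
--             if remaining and not remaining.startswith('--'):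
--                 return True
--
--     return False
-- ===== SOURCE B (Python) =====
-- def _has_multiple_statements(query: str) -> bool:
--     """Single pass: track string state and a pending-semicolon flag; resolve the
--     'is there real content after the semicolon' question inline instead of
--     slicing and stripping the suffix at every semicolon."""
--     NONE, PENDING, DASH = 0, 1, 2
--     mode = NONE
--     in_string = False
--     string_char = None
--     prev = None
--     for char in query:
--         if mode == DASH:
--             if char == '-':
--                 mode = NONE          # "--" comment: this semicolon does not count
--             else:
--                 return True          # remaining starts with '-' but not '--'
--         elif mode == PENDING:
--             if char not in ' \t\n\r':
--                 if char == '-':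
--                     mode = DASH
--                 else:
--                     return True      # first non-whitespace content after ';'
--         else:
--             if char in ('"', "'") and prev != '\\':
--                 if not in_string:
--                     in_string = True
--                     string_char = char
--                 elif char == string_char:
--                     in_string = False
--             elif char == ';' and not in_string:
--                 mode = PENDING
--         prev = char
--     return mode == DASH              # trailing lone '-' after ';' is content
-- ===== Notes on version B (the rewrite author's own statement) =====
-- stated objective: alternative
-- what changed: A re-slices and strips the whole remaining suffix at every unquoted semicolon; B does one left-to-right pass with a pending-semicolon/dash state machine that inspects the characters after a semicolon inline (worst-case linear instead of quadratic, though that shows only on adversarial inputs).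
import Mathlib
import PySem

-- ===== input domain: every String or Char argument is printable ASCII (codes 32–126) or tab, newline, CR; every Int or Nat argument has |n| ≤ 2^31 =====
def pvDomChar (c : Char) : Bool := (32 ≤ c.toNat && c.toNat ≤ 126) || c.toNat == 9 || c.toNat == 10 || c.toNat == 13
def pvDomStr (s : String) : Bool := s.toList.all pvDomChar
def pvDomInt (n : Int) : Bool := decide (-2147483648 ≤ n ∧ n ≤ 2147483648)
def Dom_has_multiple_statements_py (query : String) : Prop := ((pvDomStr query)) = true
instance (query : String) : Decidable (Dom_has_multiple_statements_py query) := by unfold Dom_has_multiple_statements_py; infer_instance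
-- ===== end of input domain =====

-- B replaces A's per-semicolon suffix slice + strip + startswith scan by a single pass with a
-- pending-semicolon mode that examines the characters after the semicolon inline.

-- ===== PORT A =====
-- A's for-loop over the characters; 'prev' is query[i-1] (none at i = 0, so Python's
-- 'i == 0 or query[i-1] != \\' is 'prev = none ∨ ¬ prev = some '\\''), and the untraversed
-- tail 'rest' is exactly the slice query[i+1:], so 'remaining' is its strip.
def hmsALoop : List Char → Option Char → Bool → Option Char → Bool
  | [], _, _, _ => false
  | c :: rest, prev, inString, stringChar =>
    if (c = '"' ∨ c = '\'') ∧ (prev = none ∨ ¬ prev = some '\\') then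
      if inString = false then hmsALoop rest (some c) true (some c)
      else if some c = stringChar then hmsALoop rest (some c) false stringChar
      else hmsALoop rest (some c) inString stringChar
    else if c = ';' ∧ inString = false then
      let remaining := PySem.Chars.strip rest
      if remaining ≠ [] ∧ ¬ PySem.Chars.startswith remaining ['-', '-'] = true then true
      else hmsALoop rest (some c) inString stringChar
    else hmsALoop rest (some c) inString stringChar

def has_multiple_statements_py (query : String) : Bool :=
  hmsALoop query.toList none false none

-- ===== PORT B =====
-- B's single pass; modes: 0 = NONE, 1 = PENDING (semicolon seen, skipping whitespace),
-- 2 = DASH (one '-' of a possible '--' comment seen)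
def hmsBLoop : List Char → Nat → Bool → Option Char → Option Char → Bool
  | [], mode, _, _, _ => mode == 2
  | c :: rest, mode, inString, stringChar, prev =>
    if mode = 2 then
      if c = '-' then hmsBLoop rest 0 inString stringChar (some c)
      else true
    else if mode = 1 then
      if ¬ (c = ' ' ∨ c = '\t' ∨ c = '\n' ∨ c = '\r') then
        if c = '-' then hmsBLoop rest 2 inString stringChar (some c)
        else true
      else hmsBLoop rest 1 inString stringChar (some c)
    else
      if (c = '"' ∨ c = '\'') ∧ ¬ prev = some '\\' then
        if inString = false then hmsBLoop rest 0 true (some c) (some c)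
        else if some c = stringChar then hmsBLoop rest 0 false stringChar (some c)
        else hmsBLoop rest 0 inString stringChar (some c)
      else if c = ';' ∧ inString = false then hmsBLoop rest 1 inString stringChar (some c)
      else hmsBLoop rest 0 inString stringChar (some c)

def has_multiple_statements_py_alt (query : String) : Bool :=
  hmsBLoop query.toList 0 false none none

-- ===== PRECONDITION & SPEC =====
def Spec_has_multiple_statements_py (query : String) (out : Bool) : Prop := out = has_multiple_statements_py_alt query
instance (query : String) (out : Bool) : Decidable (Spec_has_multiple_statements_py query out) := by unfold Spec_has_multiple_statements_py; infer_instance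

-- ===== CLAIM (what is proved, stated in full; the proofs are below) =====
def Claim_equal_has_multiple_statements_py : Prop := ∀ (query : String), Dom_has_multiple_statements_py query → Spec_has_multiple_statements_py query (has_multiple_statements_py query)

-- ===== LEMMAS AND PROOFS =====

-- A's per-semicolon condition "strip(rest) nonempty and not starting with '--'",
-- recomputed as a left-to-right scan (proof-side only).
def semCond : List Char → Bool
  | [] => false
  | c :: rest =>
    if c = ' ' ∨ c = '\t' ∨ c = '\n' ∨ c = '\r' then semCond rest
    else if c = '-' then decide (¬ rest.head? = some '-')
    else true

theorem char_eq_iff_toNat (c d : Char) : c = d ↔ c.toNat = d.toNat := by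
  constructor
  · intro e; rw [e]
  · intro e; rw [← Char.ofNat_toNat c, ← Char.ofNat_toNat d, e]

-- on the ASCII domain, Python whitespace is exactly space/tab/LF/CR
theorem isspace_dom (c : Char) (h : pvDomChar c = true) :
    PySem.Chars.isspace c = true ↔ (c = ' ' ∨ c = '\t' ∨ c = '\n' ∨ c = '\r') := by
  simp [pvDomChar] at h
  simp only [PySem.Chars.isspace, Bool.or_eq_true, Bool.and_eq_true, decide_eq_true_eq]
  rw [char_eq_iff_toNat c ' ', char_eq_iff_toNat c '\t', char_eq_iff_toNat c '\n',
    char_eq_iff_toNat c '\r']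
  have e1 : (' ' : Char).toNat = 32 := rfl
  have e2 : ('\t' : Char).toNat = 9 := rfl
  have e3 : ('\n' : Char).toNat = 10 := rfl
  have e4 : ('\r' : Char).toNat = 13 := rfl
  rw [e1, e2, e3, e4]
  omega

theorem isspace_dom_false (c : Char) (h : pvDomChar c = true)
    (hws : ¬ (c = ' ' ∨ c = '\t' ∨ c = '\n' ∨ c = '\r')) :
    PySem.Chars.isspace c = false := by
  cases hb : PySem.Chars.isspace c
  · rfl
  · exact absurd ((isspace_dom c h).1 hb) hws

theorem lstrip_cons (c : Char) (rest : List Char) :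
    PySem.Chars.lstrip (c :: rest) =
      if PySem.Chars.isspace c then PySem.Chars.lstrip rest else c :: rest := by
  simp [PySem.Chars.lstrip, List.dropWhile_cons]

theorem rstrip_cons (d : Char) (r : List Char) :
    PySem.Chars.rstrip (d :: r) =
      if PySem.Chars.rstrip r = [] then (if PySem.Chars.isspace d then [] else [d])
      else d :: PySem.Chars.rstrip r := by
  simp only [PySem.Chars.rstrip, List.reverse_cons, List.dropWhile_append]
  by_cases h : List.dropWhile PySem.Chars.isspace r.reverse = []
  · simp [h, List.dropWhile_cons]
    split_ifs <;> simp_all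
  · simp [h, List.isEmpty_iff]

theorem rstrip_head_dash (rest : List Char) :
    List.isPrefixOf ['-'] (PySem.Chars.rstrip rest) = decide (rest.head? = some '-') := by
  cases rest with
  | nil => simp [PySem.Chars.rstrip]
  | cons d r =>
    rw [rstrip_cons]
    split_ifs with h1 h2
    · have hd : d ≠ '-' := fun e => by subst e; exact absurd h2 (by decide)
      simp [List.isPrefixOf, hd]
    · rcases eq_or_ne d '-' with e | e
      · subst e; simp [List.isPrefixOf]
      · simp [List.isPrefixOf, e, Ne.symm e]
    · rcases eq_or_ne d '-' with e | e
      · subst e; simp [List.isPrefixOf]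
      · simp [List.isPrefixOf, e, Ne.symm e]

theorem semCond_eq (l : List Char) (hdom : ∀ c ∈ l, pvDomChar c = true) :
    semCond l =
      decide (PySem.Chars.strip l ≠ [] ∧
        ¬ PySem.Chars.startswith (PySem.Chars.strip l) ['-', '-'] = true) := by
  induction l with
  | nil => simp [semCond, PySem.Chars.strip, PySem.Chars.lstrip, PySem.Chars.rstrip]
  | cons c rest ih =>
    have hdc : pvDomChar c = true := hdom c (List.mem_cons_self ..)
    have hdr : ∀ x ∈ rest, pvDomChar x = true := fun x hx => hdom x (List.mem_cons_of_mem _ hx)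
    by_cases hws : c = ' ' ∨ c = '\t' ∨ c = '\n' ∨ c = '\r'
    · have hsp : PySem.Chars.isspace c = true := (isspace_dom c hdc).2 hws
      rw [show semCond (c :: rest) = semCond rest by simp [semCond, hws]]
      rw [show PySem.Chars.strip (c :: rest) = PySem.Chars.strip rest by
        simp [PySem.Chars.strip, lstrip_cons, hsp]]
      exact ih hdr
    · have hsp : PySem.Chars.isspace c = false := isspace_dom_false c hdc hws
      have hstrip : PySem.Chars.strip (c :: rest) = c :: PySem.Chars.rstrip rest := by
        rw [show PySem.Chars.strip (c :: rest) = PySem.Chars.rstrip (c :: rest) by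
          simp [PySem.Chars.strip, lstrip_cons, hsp], rstrip_cons]
        split_ifs <;> simp_all
      rw [hstrip]
      simp only [semCond, hws, if_false]
      by_cases hc : c = '-'
      · subst hc
        rw [show (PySem.Chars.startswith ('-' :: PySem.Chars.rstrip rest) ['-','-'] : Bool)
            = List.isPrefixOf ['-'] (PySem.Chars.rstrip rest) by
          simp [PySem.Chars.startswith, List.isPrefixOf]]
        rw [rstrip_head_dash]
        by_cases hh : rest.head? = some '-' <;> simp [hh]
      · have hbc : ('-' == c) = false := by
          simp only [beq_eq_false_iff_ne]; exact fun e => hc e.symm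
        rw [if_neg hc]
        rw [show (PySem.Chars.startswith (c :: PySem.Chars.rstrip rest) ['-','-'] : Bool) = false by
          simp [PySem.Chars.startswith, List.isPrefixOf, hbc]]
        simp
theorem loops_agree (n : Nat) : ∀ l : List Char, l.length ≤ n → (∀ c ∈ l, pvDomChar c = true) →
    (∀ prev inString stringChar,
      hmsALoop l prev inString stringChar = hmsBLoop l 0 inString stringChar prev)
    ∧ (∀ prev inString stringChar,
      hmsBLoop l 1 inString stringChar prev =
        if semCond l then true else hmsALoop l prev inString stringChar)
    ∧ (∀ prev inString stringChar,
      hmsBLoop l 2 inString stringChar prev =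
        if l.head? = some '-' then hmsALoop l.tail (some '-') inString stringChar
        else true) := by
  induction n with
  | zero =>
    intro l hl _
    have : l = [] := List.eq_nil_of_length_eq_zero (Nat.le_zero.1 hl)
    subst this
    exact ⟨fun _ _ _ => rfl, fun _ _ _ => by simp [hmsBLoop, hmsALoop, semCond],
      fun _ _ _ => by simp [hmsBLoop]⟩
  | succ n ih =>
    intro l hl hdom
    cases l with
    | nil =>
      exact ⟨fun _ _ _ => rfl, fun _ _ _ => by simp [hmsBLoop, hmsALoop, semCond],
        fun _ _ _ => by simp [hmsBLoop]⟩
    | cons c rest =>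
      have hlr : rest.length ≤ n := by simpa using Nat.lt_succ_iff.mp (by simpa using hl)
      have hdc : pvDomChar c = true := hdom c (List.mem_cons_self ..)
      have hdr : ∀ x ∈ rest, pvDomChar x = true := fun x hx => hdom x (List.mem_cons_of_mem _ hx)
      obtain ⟨ihm, ihp, ihd⟩ := ih rest hlr hdr
      have h02 : ¬ ((0 : Nat) = 2) := by decide
      have h01 : ¬ ((0 : Nat) = 1) := by decide
      refine ⟨?_, ?_, ?_⟩
      · -- NONE mode: A's loop body vs B's loop body
        intro prev inString stringChar
        simp only [hmsALoop, hmsBLoop]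
        rw [if_neg h02, if_neg h01]
        by_cases hq : (c = '"' ∨ c = '\'') ∧ ¬ prev = some '\\'
        · rw [if_pos ⟨hq.1, Or.inr hq.2⟩, if_pos hq]
          by_cases hs : inString = false
          · rw [if_pos hs, if_pos hs]; exact ihm _ _ _
          · rw [if_neg hs, if_neg hs]
            by_cases he : some c = stringChar
            · rw [if_pos he, if_pos he]; exact ihm _ _ _
            · rw [if_neg he, if_neg he]; exact ihm _ _ _
        · have hq' : ¬ ((c = '"' ∨ c = '\'') ∧ (prev = none ∨ ¬ prev = some '\\')) := by
            cases prev <;> simp_all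
          rw [if_neg hq', if_neg hq]
          by_cases hsc : c = ';' ∧ inString = false
          · rw [if_pos hsc, if_pos hsc, ihp (some c) inString stringChar]
            by_cases hp : (PySem.Chars.strip rest ≠ [] ∧
                ¬ PySem.Chars.startswith (PySem.Chars.strip rest) ['-', '-'] = true)
            · rw [if_pos hp, show semCond rest = true by
                rw [semCond_eq rest hdr]; simpa using hp]
              simp
            · rw [if_neg hp, show semCond rest = false by
                rw [semCond_eq rest hdr]; simpa using hp]
              simp
          · rw [if_neg hsc, if_neg hsc]; exact ihm _ _ _
      · -- PENDING mode
        intro prev inString stringChar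
        by_cases hws : c = ' ' ∨ c = '\t' ∨ c = '\n' ∨ c = '\r'
        · have hA : hmsALoop (c :: rest) prev inString stringChar
              = hmsALoop rest (some c) inString stringChar := by
            rcases hws with rfl | rfl | rfl | rfl <;> simp [hmsALoop]
          have hB : hmsBLoop (c :: rest) 1 inString stringChar prev
              = hmsBLoop rest 1 inString stringChar (some c) := by
            rcases hws with rfl | rfl | rfl | rfl <;> simp [hmsBLoop]
          have hS : semCond (c :: rest) = semCond rest := by simp [semCond, hws]
          rw [hB, ihp (some c) inString stringChar, hS, hA]
        · by_cases hc : c = '-'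
          · subst hc
            have hB : hmsBLoop ('-' :: rest) 1 inString stringChar prev
                = hmsBLoop rest 2 inString stringChar (some '-') := by
              simp [hmsBLoop]
            rw [hB, ihd (some '-') inString stringChar]
            by_cases hh : rest.head? = some '-'
            · cases rest with
              | nil => simp at hh
              | cons d r =>
                have hd : d = '-' := by simpa using hh
                subst hd
                simp [semCond, hmsALoop]
            · have hS : semCond ('-' :: rest) = true := by
                simp [semCond, hh]
              simp [hS, hh]
          · have hB : hmsBLoop (c :: rest) 1 inString stringChar prev = true := by
              simp [hmsBLoop, hws, hc]
            have hS : semCond (c :: rest) = true := by simp [semCond, hws, hc]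
            rw [hB, hS]
            simp
      · -- DASH mode
        intro prev inString stringChar
        by_cases hc : c = '-'
        · subst hc
          have hB : hmsBLoop ('-' :: rest) 2 inString stringChar prev
              = hmsBLoop rest 0 inString stringChar (some '-') := by
            simp [hmsBLoop]
          rw [hB, ← ihm (some '-') inString stringChar]
          simp
        · have hB : hmsBLoop (c :: rest) 2 inString stringChar prev = true := by
            simp [hmsBLoop, hc]
          have hhd : ¬ ((c :: rest).head? = some '-') := by simpa using hc
          rw [hB, if_neg hhd]

-- ===== VERDICT (by name: the statement is the Claim_ definition above) =====
theorem has_multiple_statements_py_spec : Claim_equal_has_multiple_statements_py := by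
  intro query hdom
  unfold Spec_has_multiple_statements_py has_multiple_statements_py has_multiple_statements_py_alt
  have hd : ∀ c ∈ query.toList, pvDomChar c = true := by
    simpa [Dom_has_multiple_statements_py, pvDomStr, List.all_eq_true] using hdom
  exact ((loops_agree query.toList.length query.toList le_rfl hd).1 none false none)
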